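-- pv_equiv track=rewrite | github.com/tetsushi33/IshidaLab_research_project | dataset_preprocess/src_make_dataset/old/pocket_identification.py | select_aligned_residues_and_store_numbers
-- ===== SOURCE A (Python) =====
-- def select_aligned_residues_and_store_numbers(apo_chain_id, alignment, apo_residue_numbers):
--     selected_residue_numbers = []
--     query = []
--
--     apo_index = 0
--     holo_index = 0
--
--     for apo_res, holo_res in zip(alignment[0], alignment[1]):
--         if apo_res != "-" and holo_res != "-":
--             # Both residues are aligned
--             query.append(f"(chain {apo_chain_id} and resi {apo_residue_numbers[apo_index]})")
--             selected_residue_numbers.append(apo_residue_numbers[apo_index])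
--
--         if apo_res != "-":
--             apo_index += 1
--         if holo_res != "-":
--             holo_index += 1
--
--     return " or ".join(query), selected_residue_numbers
-- ===== SOURCE B (Python) =====
-- def select_aligned_residues_and_store_numbers(apo_chain_id, alignment, apo_residue_numbers):
--     apo_seq, holo_seq = alignment[0], alignment[1]
--     # pass 1: per-column table of apo residue-list indices (None on apo gaps)
--     idx = 0
--     numbered = []
--     for ch in apo_seq[:len(holo_seq)]:
--         if ch != "-":
--             numbered.append(idx)
--             idx += 1
--         else:
--             numbered.append(None)
--     # pass 2: filter the table against the holo row, looking the numbers up lazily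
--     selected = [apo_residue_numbers[k] for k, h in zip(numbered, holo_seq)
--                 if k is not None and h != "-"]
--     query = " or ".join(f"(chain {apo_chain_id} and resi {n})" for n in selected)
--     return query, selected
-- ===== Notes on version B (the rewrite author's own statement) =====
-- stated objective: alternative
-- what changed: Replaces A's single fused loop with running apo/holo counters by two separately-shaped passes: a first pass builds a per-column table assigning each alignment column its apo residue-list index (None on apo gaps), and a second pass filters that table against the holo row, looking residue numbers up lazily and mapping/joining the query from the result. Pre_ only excludes inputs where A raises (fewer than two alignment rows, or a both-aligned column whose apo index is past the end of apo_residue_numbers); B raises on exactly the same inputs.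
import Mathlib
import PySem

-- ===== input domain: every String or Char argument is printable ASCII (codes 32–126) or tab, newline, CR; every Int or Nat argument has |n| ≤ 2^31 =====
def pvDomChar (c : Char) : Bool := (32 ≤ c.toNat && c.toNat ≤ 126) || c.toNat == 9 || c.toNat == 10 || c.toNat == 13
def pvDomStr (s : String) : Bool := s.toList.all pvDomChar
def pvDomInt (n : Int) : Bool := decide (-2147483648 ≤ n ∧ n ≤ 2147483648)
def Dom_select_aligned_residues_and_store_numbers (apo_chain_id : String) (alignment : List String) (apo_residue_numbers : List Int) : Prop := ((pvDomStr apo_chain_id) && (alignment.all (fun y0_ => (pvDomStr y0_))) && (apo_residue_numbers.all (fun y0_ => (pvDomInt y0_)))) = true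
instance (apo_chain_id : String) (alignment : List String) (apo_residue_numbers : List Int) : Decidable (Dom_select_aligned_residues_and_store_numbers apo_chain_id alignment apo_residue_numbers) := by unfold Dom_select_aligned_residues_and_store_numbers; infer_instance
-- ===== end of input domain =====

-- B replaces A's fused loop (running indices + in-loop selection) by two separately-shaped
-- passes: a per-column index table built first, then a filter of that table against the
-- holo row with lazy number lookup; same O(n) cost, different decomposition (objective: alternative).

-- ===== PORT A =====
-- the loop body of A's single for-loop over zip(alignment[0], alignment[1]);
-- apo_residue_numbers[apo_index]: IndexError (pyGet? = none) excluded by Pre_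
def pvStepA (apo_chain_id : String) (apo_residue_numbers : List Int)
    (st : List String × List Int × Int × Int) (p : Char × Char) :
    List String × List Int × Int × Int :=
  let q := st.1
  let s := st.2.1
  let apo_index := st.2.2.1
  let holo_index := st.2.2.2
  let qs :=
    if p.1 ≠ '-' ∧ p.2 ≠ '-' then
      (q ++ ["(chain " ++ apo_chain_id ++ " and resi "
               ++ PySem.Int.toStr ((PySem.List.pyGet? apo_residue_numbers apo_index).getD 0) ++ ")"],
       s ++ [(PySem.List.pyGet? apo_residue_numbers apo_index).getD 0])
    else (q, s)
  let apo_index := if p.1 ≠ '-' then apo_index + 1 else apo_index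
  let holo_index := if p.2 ≠ '-' then holo_index + 1 else holo_index
  (qs.1, qs.2, apo_index, holo_index)

def select_aligned_residues_and_store_numbers (apo_chain_id : String) (alignment : List String) (apo_residue_numbers : List Int) : String × List Int :=
  -- alignment[0] / alignment[1]: IndexError (pyGet? = none) excluded by Pre_
  let apo := ((PySem.List.pyGet? alignment 0).getD "").toList
  let holo := ((PySem.List.pyGet? alignment 1).getD "").toList
  let r := (apo.zip holo).foldl (pvStepA apo_chain_id apo_residue_numbers) ([], [], 0, 0)
  (PySem.Str.join " or " r.1, r.2.1)

-- ===== PORT B =====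
-- pass 1 of B: per-column table of apo residue-list indices (none on apo gaps)
def pvNumberIdx : List Char → Nat → List (Option Nat)
  | [], _ => []
  | c :: cs, k => if c ≠ '-' then some k :: pvNumberIdx cs (k + 1) else none :: pvNumberIdx cs k

def select_aligned_residues_and_store_numbers_alt (apo_chain_id : String) (alignment : List String) (apo_residue_numbers : List Int) : String × List Int :=
  let apo_seq := ((PySem.List.pyGet? alignment 0).getD "").toList
  let holo_seq := ((PySem.List.pyGet? alignment 1).getD "").toList
  let numbered := pvNumberIdx (apo_seq.take holo_seq.length) 0
  -- pass 2: lazy lookup apo_residue_numbers[k]: IndexError (pyGet? = none) excluded by Pre_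
  let selected := (numbered.zip holo_seq).filterMap (fun p =>
    match p.1 with
    | some k => if p.2 ≠ '-' then some ((PySem.List.pyGet? apo_residue_numbers (k : Int)).getD 0) else none
    | none => none)
  let query := PySem.Str.join " or "
    (selected.map (fun n => "(chain " ++ apo_chain_id ++ " and resi " ++ PySem.Int.toStr n ++ ")"))
  (query, selected)

-- ===== PRECONDITION & SPEC =====
-- Pre_ excludes exactly the inputs on which the Python A raises: fewer than two alignment rows
-- (IndexError on alignment[1]), and any both-aligned column whose apo index reaches past the end
-- of apo_residue_numbers (IndexError there); Python B raises on exactly the same inputs.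
def Pre_select_aligned_residues_and_store_numbers (_apo_chain_id : String) (alignment : List String) (apo_residue_numbers : List Int) : Prop :=
  2 ≤ alignment.length ∧
  (∀ i ∈ List.range (min (alignment.getD 0 "").toList.length (alignment.getD 1 "").toList.length),
    ((alignment.getD 0 "").toList.getD i '-' ≠ '-' ∧ (alignment.getD 1 "").toList.getD i '-' ≠ '-') →
    (((alignment.getD 0 "").toList.take i).filter (· ≠ '-')).length < apo_residue_numbers.length)

instance (apo_chain_id : String) (alignment : List String) (apo_residue_numbers : List Int) : Decidable (Pre_select_aligned_residues_and_store_numbers apo_chain_id alignment apo_residue_numbers) := by unfold Pre_select_aligned_residues_and_store_numbers; infer_instance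

def pvWitness_select_aligned_residues_and_store_numbers : String × List String × List Int :=
  ("A", ["AB-C", "A-BC"], [3, 5, 7])

def Spec_select_aligned_residues_and_store_numbers (apo_chain_id : String) (alignment : List String) (apo_residue_numbers : List Int) (out : String × List Int) : Prop := out = select_aligned_residues_and_store_numbers_alt apo_chain_id alignment apo_residue_numbers
instance (apo_chain_id : String) (alignment : List String) (apo_residue_numbers : List Int) (out : String × List Int) : Decidable (Spec_select_aligned_residues_and_store_numbers apo_chain_id alignment apo_residue_numbers out) := by unfold Spec_select_aligned_residues_and_store_numbers; infer_instance

-- ===== CLAIM (what is proved, stated in full; the proofs are below) =====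
def Claim_equal_select_aligned_residues_and_store_numbers : Prop := ∀ (apo_chain_id : String) (alignment : List String) (apo_residue_numbers : List Int), Dom_select_aligned_residues_and_store_numbers apo_chain_id alignment apo_residue_numbers → Pre_select_aligned_residues_and_store_numbers apo_chain_id alignment apo_residue_numbers → Spec_select_aligned_residues_and_store_numbers apo_chain_id alignment apo_residue_numbers (select_aligned_residues_and_store_numbers apo_chain_id alignment apo_residue_numbers)

-- ===== LEMMAS AND PROOFS =====

-- B's pass 2, abbreviated for the invariant
def pvSel (nums : List Int) (numbered : List (Option Nat)) (holo : List Char) : List Int :=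
  (numbered.zip holo).filterMap (fun p =>
    match p.1 with
    | some k => if p.2 ≠ '-' then some ((PySem.List.pyGet? nums (k : Int)).getD 0) else none
    | none => none)

def pvFrag (C : String) (n : Int) : String :=
  "(chain " ++ C ++ " and resi " ++ PySem.Int.toStr n ++ ")"

-- loop invariant: A's fold, started with apo_index = k, appends exactly B's selection
-- built from the index table started at k (both sides read the same indices, so no
-- range hypothesis is needed: the ports agree even where Python would raise)
theorem pvMain (C : String) (nums : List Int) : ∀ (apo holo : List Char) (k : Nat)
    (q : List String) (s : List Int) (hi : Int),
    (((apo.zip holo).foldl (pvStepA C nums) (q, s, (k : Int), hi)).1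
        = q ++ (pvSel nums (pvNumberIdx (apo.take holo.length) k) holo).map (pvFrag C))
    ∧ (((apo.zip holo).foldl (pvStepA C nums) (q, s, (k : Int), hi)).2.1
        = s ++ pvSel nums (pvNumberIdx (apo.take holo.length) k) holo) := by
  intro apo
  induction apo with
  | nil => intro holo k q s hi; simp [pvSel, pvNumberIdx]
  | cons c cs ih =>
    intro holo k q s hi
    cases holo with
    | nil => simp [pvSel, pvNumberIdx]
    | cons h hs =>
      by_cases hc : c = '-'
      · subst hc
        have H := ih hs k q s (if h ≠ '-' then hi + 1 else hi)
        simpa [pvStepA, pvNumberIdx, pvSel] using H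
      · have hcast : ((k : Int) + 1) = ((k + 1 : Nat) : Int) := by push_cast; ring
        by_cases hh : h = '-'
        · subst hh
          have H := ih hs (k + 1) q s hi
          rw [← hcast] at H
          simpa [pvStepA, hc, pvNumberIdx, pvSel] using H
        · have H := ih hs (k + 1)
            (q ++ [pvFrag C ((PySem.List.pyGet? nums (k : Int)).getD 0)])
            (s ++ [(PySem.List.pyGet? nums (k : Int)).getD 0]) (hi + 1)
          rw [← hcast] at H
          simp only [List.length_cons, List.take_succ_cons, List.zip_cons_cons, List.foldl_cons,
            pvStepA, hc, hh, ne_eq, not_false_eq_true, and_self, if_true]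
          simp only [pvNumberIdx, hc, ne_eq, not_false_eq_true, ite_true]
          simp only [pvSel, List.zip_cons_cons, List.filterMap_cons, hh, ne_eq,
            not_false_eq_true, ite_true]
          constructor
          · have := H.1
            simpa [pvFrag, pvSel] using this
          · have := H.2
            simpa [pvSel] using this

-- ===== VERDICT (by name: the statement is the Claim_ definition above) =====
theorem select_aligned_residues_and_store_numbers_spec : Claim_equal_select_aligned_residues_and_store_numbers := by
  intro C alignment nums _ _
  unfold Spec_select_aligned_residues_and_store_numbers
  unfold select_aligned_residues_and_store_numbers select_aligned_residues_and_store_numbers_alt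
  dsimp only
  have H := pvMain C nums (((PySem.List.pyGet? alignment 0).getD "").toList)
    (((PySem.List.pyGet? alignment 1).getD "").toList) 0 [] [] 0
  simp only [Nat.cast_zero, List.nil_append] at H
  rw [Prod.ext_iff]
  refine ⟨?_, ?_⟩
  · rw [H.1]
    simp only [pvSel]
    exact congrArg _ (List.map_congr_left fun n _ => rfl)
  · rw [H.2]
    simp only [pvSel]
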